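-- pv_equiv track=rewrite | github.com/lesleslie/mahavishnu | scripts/marketplace/migrate-project.py | map_agents_to_plugins
-- ===== SOURCE A (Python) =====
-- from collections import defaultdict
--
-- def map_agents_to_plugins(agent_names: list[str], categorization: dict) -> dict[str, list[str]]:
--     """Map agent names to their plugin IDs."""
--     plugin_agents = defaultdict(list)
--
--     for plugin_id, plugin_data in categorization.items():
--         plugin_agent_names = plugin_data.get("agents", [])
--         for agent in agent_names:
--             if agent in plugin_agent_names:
--                 plugin_agents[plugin_id].append(agent)
--
--     return dict(plugin_agents)
-- ===== SOURCE B (Python) =====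
-- from collections import defaultdict
--
--
-- def map_agents_to_plugins(agent_names: list[str], categorization: dict) -> dict[str, list[str]]:
--     """Map agent names to their plugin IDs via an inverted index over agent_names."""
--     pos = defaultdict(list)
--     for i, name in enumerate(agent_names):
--         pos[name].append(i)
--
--     result = {}
--     for plugin_id, plugin_data in categorization.items():
--         idxs = set()
--         for g in plugin_data.get("agents", []):
--             idxs.update(pos.get(g, ()))
--         if idxs:
--             result[plugin_id] = [agent_names[i] for i in sorted(idxs)]
--     return result
-- ===== Notes on version B (the rewrite author's own statement) =====
-- stated objective: faster
-- what changed: Replaces A's per-plugin scan over agent_names with its list-membership test by an inverted index from agent name to its positions, built once over agent_names; each plugin then unions the positions of its own agents and reads the matched agents back in order.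
import Mathlib
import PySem

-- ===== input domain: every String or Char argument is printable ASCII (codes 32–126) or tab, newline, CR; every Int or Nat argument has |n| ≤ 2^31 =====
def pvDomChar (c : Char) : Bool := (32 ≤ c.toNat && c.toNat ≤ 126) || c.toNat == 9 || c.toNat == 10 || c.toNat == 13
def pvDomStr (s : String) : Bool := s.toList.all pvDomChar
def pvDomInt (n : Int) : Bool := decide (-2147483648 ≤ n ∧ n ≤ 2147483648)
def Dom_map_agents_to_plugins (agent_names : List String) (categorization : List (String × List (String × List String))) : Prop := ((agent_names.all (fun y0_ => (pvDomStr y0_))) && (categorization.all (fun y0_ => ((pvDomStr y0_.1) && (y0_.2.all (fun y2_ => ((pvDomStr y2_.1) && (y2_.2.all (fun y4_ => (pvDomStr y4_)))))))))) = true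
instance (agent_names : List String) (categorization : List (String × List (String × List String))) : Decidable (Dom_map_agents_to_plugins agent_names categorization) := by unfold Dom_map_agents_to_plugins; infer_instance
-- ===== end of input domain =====

-- B replaces A's plugin×agent nested scan by an inverted index from agent names to their
-- positions, built in one pass over agent_names (objective: faster on many agents).

-- ===== PORT A =====
-- categorization models the Python dict argument; iterating it = iterating its pairs.
def map_agents_to_plugins (agent_names : List String) (categorization : List (String × List (String × List String))) : List (String × List String) :=
  let plugin_agents : PySem.Dict String (List String) :=
    categorization.foldl (fun d pd =>
      let plugin_agent_names := (PySem.Dict.mk pd.2).getD "agents" []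
      agent_names.foldl (fun d2 agent =>
        if plugin_agent_names.contains agent then d2.modify pd.1 [] (· ++ [agent]) else d2) d)
      PySem.Dict.empty
  plugin_agents.items

-- ===== PORT B =====
-- pyGetD is exact here: every index stored in pos is a valid nonnegative index of agent_names.
def map_agents_to_plugins_alt (agent_names : List String) (categorization : List (String × List (String × List String))) : List (String × List String) :=
  let pos : PySem.Dict String (List Int) :=
    (PySem.List.enumerate agent_names).foldl (fun d p => d.modify p.2 [] (· ++ [p.1])) PySem.Dict.empty
  let result : PySem.Dict String (List String) :=
    categorization.foldl (fun res pd =>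
      let idxs : PySem.Set Int :=
        ((PySem.Dict.mk pd.2).getD "agents" []).foldl
          (fun s g => PySem.Set.update s (pos.getD g [])) PySem.Set.empty
      if idxs.isEmpty then res
      else res.insert pd.1 ((PySem.List.sorted idxs (fun i => i)).map (fun i => PySem.List.pyGetD agent_names i "")))
      PySem.Dict.empty
  result.items

-- ===== PRECONDITION & SPEC =====
-- Pre_ excludes association lists whose top-level keys repeat: a Python dict cannot carry
-- duplicate keys, so such lists do not encode any input the Python function is ever given.
def Pre_map_agents_to_plugins (_agent_names : List String) (categorization : List (String × List (String × List String))) : Prop :=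
  (categorization.map (fun p => p.1)).Nodup
instance (agent_names : List String) (categorization : List (String × List (String × List String))) : Decidable (Pre_map_agents_to_plugins agent_names categorization) := by unfold Pre_map_agents_to_plugins; infer_instance

def pvWitness_map_agents_to_plugins : List String × (List (String × List (String × List String))) :=
  (["alice", "bob"], [("p1", [("agents", ["bob"])]), ("p2", [("agents", ["alice", "bob"])])])

def Spec_map_agents_to_plugins (agent_names : List String) (categorization : List (String × List (String × List String))) (out : List (String × List String)) : Prop := out = map_agents_to_plugins_alt agent_names categorization
instance (agent_names : List String) (categorization : List (String × List (String × List String))) (out : List (String × List String)) : Decidable (Spec_map_agents_to_plugins agent_names categorization out) := by unfold Spec_map_agents_to_plugins; infer_instance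

-- ===== CLAIM (what is proved, stated in full; the proofs are below) =====
def Claim_equal_map_agents_to_plugins : Prop := ∀ (agent_names : List String) (categorization : List (String × List (String × List String))), Dom_map_agents_to_plugins agent_names categorization → Pre_map_agents_to_plugins agent_names categorization → Spec_map_agents_to_plugins agent_names categorization (map_agents_to_plugins agent_names categorization)

-- ===== LEMMAS AND PROOFS =====

def pvAgents (pd : List (String × List String)) : List String :=
  (PySem.Dict.mk pd).getD "agents" []
def pvMatched (agent_names : List String) (pd : List (String × List String)) : List String :=
  agent_names.filter (fun a => (pvAgents pd).contains a)
-- the common canonical result both ports are reduced to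
def pvCanon (agent_names : List String) (cat : List (String × List (String × List String))) : List (String × List String) :=
  cat.flatMap (fun pd => if pvMatched agent_names pd.2 = [] then [] else [(pd.1, pvMatched agent_names pd.2)])

lemma pv_modify_loop (pid : String) (m : List String) :
    ∀ (init : List (String × List String)) (v : List String), pid ∉ init.map (fun p => p.1) →
    (m.foldl (fun d2 a => PySem.Dict.modify d2 pid [] (· ++ [a])) (PySem.Dict.mk (init ++ [(pid, v)]))).items
      = init ++ [(pid, v ++ m)] := by
  induction m with
  | nil => intro init v _; simp
  | cons a t ih =>
    intro init v h
    have hfind : List.find? (fun p => p.1 == pid) init = none := by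
      rw [List.find?_eq_none]
      intro x hx
      simp only [beq_iff_eq]
      exact fun he => h (List.mem_map.mpr ⟨x, hx, he⟩)
    have hget : (PySem.Dict.mk (init ++ [(pid, v)])).getD pid [] = v := by
      rw [PySem.Dict.getD_eq_get?_getD]
      simp [PySem.Dict.get?, List.find?_append, hfind]
    have hcont : (PySem.Dict.mk (init ++ [(pid, v)])).contains pid = true := by
      rw [PySem.Dict.contains_eq_decide_mem_keys]
      simp [PySem.Dict.keys_mk]
    have hstep : PySem.Dict.modify (PySem.Dict.mk (init ++ [(pid, v)])) pid [] (· ++ [a])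
        = PySem.Dict.mk (init ++ [(pid, v ++ [a])]) := by
      apply PySem.Dict.ext
      rw [PySem.Dict.modify, hget, PySem.Dict.items_insert_of_contains _ _ hcont]
      simp only [List.map_append, List.map_cons, List.map_nil, beq_self_eq_true, if_pos]
      congr 1
      · conv_rhs => rw [← List.map_id init]
        apply List.map_congr_left
        intro x hx
        have : ¬ (x.1 == pid) = true := by
          simp only [beq_iff_eq]
          exact fun he => h (List.mem_map.mpr ⟨x, hx, he⟩)
        simp [this]
    rw [List.foldl_cons, hstep, ih init (v ++ [a]) h]
    simp

lemma pv_A_inner (an pn : List String) (pid : String) (init : List (String × List String))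
    (h : pid ∉ init.map (fun p => p.1)) :
    (an.foldl (fun d2 a => if pn.contains a then PySem.Dict.modify d2 pid [] (· ++ [a]) else d2)
      (PySem.Dict.mk init)).items
      = init ++ (if an.filter (fun a => pn.contains a) = [] then []
                 else [(pid, an.filter (fun a => pn.contains a))]) := by
  rw [PySem.List.foldl_if_eq_foldl_filter]
  cases hm : an.filter (fun a => pn.contains a) with
  | nil => simp
  | cons a t =>
    have hcont : (PySem.Dict.mk init).contains pid = false := by
      rw [PySem.Dict.contains_eq_decide_mem_keys]
      simp [PySem.Dict.keys_mk, h]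
    have hstep : PySem.Dict.modify (PySem.Dict.mk init) pid [] (· ++ [a])
        = PySem.Dict.mk (init ++ [(pid, [a])]) := by
      apply PySem.Dict.ext
      rw [PySem.Dict.modify, PySem.Dict.getD_of_not_contains _ _ hcont,
        PySem.Dict.items_insert_of_not_contains _ _ hcont]
      simp
    rw [List.foldl_cons, hstep, pv_modify_loop pid t init [a] h]
    simp

lemma pv_A_outer (an : List String) :
    ∀ (cat : List (String × List (String × List String))) (init : List (String × List String)),
    (cat.map (fun p => p.1)).Nodup → (∀ p ∈ cat, p.1 ∉ init.map (fun q => q.1)) →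
    (cat.foldl (fun d pd =>
        let plugin_agent_names := (PySem.Dict.mk pd.2).getD "agents" []
        an.foldl (fun d2 agent =>
          if plugin_agent_names.contains agent then d2.modify pd.1 [] (· ++ [agent]) else d2) d)
      (PySem.Dict.mk init)).items = init ++ pvCanon an cat := by
  intro cat
  induction cat with
  | nil => intro init _ _; simp [pvCanon]
  | cons pd ct ih =>
    intro init hnd hdisj
    have hnd' : pd.1 ∉ ct.map (fun p => p.1) ∧ (ct.map (fun p => p.1)).Nodup := by
      rw [List.map_cons, List.nodup_cons] at hnd; exact hnd
    rw [List.foldl_cons]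
    have hpd : pd.1 ∉ init.map (fun q => q.1) := hdisj pd (by simp)
    have hstep := pv_A_inner an ((PySem.Dict.mk pd.2).getD "agents" []) pd.1 init hpd
    set m := an.filter (fun a => ((PySem.Dict.mk pd.2).getD "agents" []).contains a) with hm
    have hmm : m = pvMatched an pd.2 := rfl
    have hdict : (an.foldl (fun d2 agent =>
        if ((PySem.Dict.mk pd.2).getD "agents" []).contains agent then d2.modify pd.1 [] (· ++ [agent]) else d2)
        (PySem.Dict.mk init))
        = PySem.Dict.mk (init ++ (if m = [] then [] else [(pd.1, m)])) := by
      apply PySem.Dict.ext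
      exact hstep
    simp only []
    rw [hdict, ih (init ++ (if m = [] then [] else [(pd.1, m)]))
      hnd'.2
      (by
        intro p hp
        simp only [List.map_append, List.mem_append]
        rintro (hin | hopt)
        · exact hdisj p (by simp [hp]) hin
        · have hne : p.1 ≠ pd.1 := by
            intro he
            exact hnd'.1 (he ▸ List.mem_map.mpr ⟨p, hp, rfl⟩)
          split at hopt
          · simp at hopt
          · simp at hopt
            exact hne hopt)]
    simp only [pvCanon, List.flatMap_cons, ← hmm, List.append_assoc]

lemma pv_pos_getD (an : List String) (g : String) :
    ((PySem.List.enumerate an).foldl (fun d p => d.modify p.2 [] (· ++ [p.1]))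
        (PySem.Dict.empty : PySem.Dict String (List Int))).getD g []
      = ((PySem.List.enumerate an).filter (fun p => p.2 == g)).map (fun p => p.1) := by
  have hswap : (PySem.List.enumerate an).foldl (fun d p => d.modify p.2 [] (· ++ [p.1]))
      (PySem.Dict.empty : PySem.Dict String (List Int))
      = ((PySem.List.enumerate an).map (fun p => (p.2, p.1))).foldl
          (fun d p => d.modify p.1 [] (· ++ [p.2])) PySem.Dict.empty := by
    rw [List.foldl_map]
  rw [hswap, PySem.Dict.getD_foldl_modify_append]
  simp [List.filter_map, List.map_map, Function.comp_def, PySem.Dict.getD_empty]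

lemma pv_mem_foldl_update (f : String → List Int) :
    ∀ (l : List String) (s : PySem.Set Int) (i : Int),
    i ∈ l.foldl (fun s g => PySem.Set.update s (f g)) s ↔ i ∈ s ∨ ∃ g ∈ l, i ∈ f g := by
  intro l
  induction l with
  | nil => simp
  | cons g t ih =>
    intro s i
    rw [List.foldl_cons, ih, PySem.Set.mem_update]
    constructor
    · rintro ((hs | hf) | ⟨g', hg', hi⟩)
      · exact Or.inl hs
      · exact Or.inr ⟨g, by simp, hf⟩
      · exact Or.inr ⟨g', by simp [hg'], hi⟩
    · rintro (hs | ⟨g', hg', hi⟩)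
      · exact Or.inl (Or.inl hs)
      · rcases List.mem_cons.mp hg' with h | h
        · exact Or.inl (Or.inr (h ▸ hi))
        · exact Or.inr ⟨g', h, hi⟩

lemma pv_nodup_foldl_update (f : String → List Int) :
    ∀ (l : List String) (s : PySem.Set Int), s.Nodup →
    (l.foldl (fun s g => PySem.Set.update s (f g)) s).Nodup := by
  intro l
  induction l with
  | nil => intro s h; exact h
  | cons g t ih =>
    intro s h
    exact ih _ (PySem.Set.nodup_update s (f g) h)

lemma pv_sorted_idxs (an pn : List String) :
    PySem.List.sorted
      (pn.foldl (fun s g => PySem.Set.update s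
        (((PySem.List.enumerate an).foldl (fun d p => d.modify p.2 [] (· ++ [p.1]))
          (PySem.Dict.empty : PySem.Dict String (List Int))).getD g [])) PySem.Set.empty)
      (fun i => i)
      = ((PySem.List.enumerate an).filter (fun p => pn.contains p.2)).map (fun p => p.1) := by
  apply PySem.List.sorted_eq_of_perm_of_pairwise_lt
  · rw [List.perm_ext_iff_of_nodup]
    · intro i
      rw [pv_mem_foldl_update]
      simp only [PySem.Set.empty, List.not_mem_nil, false_or]
      constructor
      · intro hi
        rcases List.mem_map.mp hi with ⟨p, hp, rfl⟩
        rcases List.mem_filter.mp hp with ⟨hpe, hpc⟩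
        refine ⟨p.2, List.contains_iff_mem.mp hpc, ?_⟩
        rw [pv_pos_getD]
        exact List.mem_map.mpr ⟨p, List.mem_filter.mpr ⟨hpe, by simp⟩, rfl⟩
      · rintro ⟨g, hg, hi⟩
        rw [pv_pos_getD] at hi
        rcases List.mem_map.mp hi with ⟨p, hp, rfl⟩
        rcases List.mem_filter.mp hp with ⟨hpe, hpg⟩
        refine List.mem_map.mpr ⟨p, List.mem_filter.mpr ⟨hpe, ?_⟩, rfl⟩
        have : p.2 = g := by simpa using hpg
        rw [this]
        exact List.contains_iff_mem.mpr hg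
    · have hp : List.Pairwise (fun p q : Int × String => p.1 < q.1)
          ((PySem.List.enumerate an).filter (fun p => pn.contains p.2)) :=
        (PySem.List.pairwise_lt_enumerate an 0).filter _
      exact (List.pairwise_map.mpr hp).imp ne_of_lt
    · exact pv_nodup_foldl_update _ pn PySem.Set.empty (by simp [PySem.Set.empty])
  · have hp : List.Pairwise (fun p q : Int × String => p.1 < q.1)
        ((PySem.List.enumerate an).filter (fun p => pn.contains p.2)) :=
      (PySem.List.pairwise_lt_enumerate an 0).filter _
    exact List.pairwise_map.mpr hp

lemma pv_cand_map_back (an pn : List String) :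
    (((PySem.List.enumerate an).filter (fun p => pn.contains p.2)).map (fun p => p.1)).map
        (fun i => PySem.List.pyGetD an i "")
      = an.filter (fun a => pn.contains a) := by
  rw [List.map_map]
  have h1 : ∀ p ∈ (PySem.List.enumerate an).filter (fun p => pn.contains p.2),
      ((fun i => PySem.List.pyGetD an i "") ∘ (fun p : Int × String => p.1)) p = p.2 := by
    intro p hp
    have hpe := List.mem_filter.mp hp |>.1
    rcases (PySem.List.mem_enumerate_iff an 0 p).mp hpe with ⟨k, hk, rfl⟩
    simp only [Function.comp_apply, zero_add]
    rw [PySem.List.pyGetD_eq_getElem an _ (by positivity) (by exact_mod_cast hk)]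
    simp
  rw [List.map_congr_left h1]
  conv_rhs => rw [← PySem.List.map_snd_enumerate an 0]
  rw [List.filter_map]
  rfl

lemma pv_idxs_empty_iff (an pn : List String) :
    (pn.foldl (fun s g => PySem.Set.update s
        (((PySem.List.enumerate an).foldl (fun d p => d.modify p.2 [] (· ++ [p.1]))
          (PySem.Dict.empty : PySem.Dict String (List Int))).getD g [])) PySem.Set.empty) = []
      ↔ an.filter (fun a => pn.contains a) = [] := by
  rw [← pv_cand_map_back an pn, ← pv_sorted_idxs an pn]
  constructor
  · intro h; rw [h]; rfl
  · intro h
    rcases List.map_eq_nil_iff.mp h with hs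
    have := PySem.List.sorted_eq_nil_iff
      (xs := (pn.foldl (fun s g => PySem.Set.update s
        (((PySem.List.enumerate an).foldl (fun d p => d.modify p.2 [] (· ++ [p.1]))
          (PySem.Dict.empty : PySem.Dict String (List Int))).getD g [])) PySem.Set.empty))
      (key := fun i : Int => i) (rev := false)
    exact this.mp hs

lemma pv_B_outer (an : List String) :
    ∀ (cat : List (String × List (String × List String))) (init : List (String × List String)),
    (cat.map (fun p => p.1)).Nodup → (∀ p ∈ cat, p.1 ∉ init.map (fun q => q.1)) →
    (cat.foldl (fun res pd =>
        let idxs : PySem.Set Int :=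
          ((PySem.Dict.mk pd.2).getD "agents" []).foldl
            (fun s g => PySem.Set.update s
              (((PySem.List.enumerate an).foldl (fun d p => d.modify p.2 [] (· ++ [p.1]))
                (PySem.Dict.empty : PySem.Dict String (List Int))).getD g [])) PySem.Set.empty
        if idxs.isEmpty then res
        else res.insert pd.1 ((PySem.List.sorted idxs (fun i => i)).map (fun i => PySem.List.pyGetD an i "")))
      (PySem.Dict.mk init)).items = init ++ pvCanon an cat := by
  intro cat
  induction cat with
  | nil => intro init _ _; simp [pvCanon]
  | cons pd ct ih =>
    intro init hnd hdisj
    have hnd' : pd.1 ∉ ct.map (fun p => p.1) ∧ (ct.map (fun p => p.1)).Nodup := by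
      rw [List.map_cons, List.nodup_cons] at hnd; exact hnd
    rw [List.foldl_cons]
    simp only []
    set m := an.filter (fun a => ((PySem.Dict.mk pd.2).getD "agents" []).contains a) with hm
    have hmm : m = pvMatched an pd.2 := rfl
    set idxs := ((PySem.Dict.mk pd.2).getD "agents" []).foldl
        (fun s g => PySem.Set.update s
          (((PySem.List.enumerate an).foldl (fun d p => d.modify p.2 [] (· ++ [p.1]))
            (PySem.Dict.empty : PySem.Dict String (List Int))).getD g [])) PySem.Set.empty with hidxs
    have hval : (PySem.List.sorted idxs (fun i => i)).map (fun i => PySem.List.pyGetD an i "") = m := by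
      rw [hidxs, pv_sorted_idxs, pv_cand_map_back]
    have hemp : idxs.isEmpty = true ↔ m = [] := by
      rw [List.isEmpty_iff, hidxs, pv_idxs_empty_iff]
    have hstep : (if idxs.isEmpty then (PySem.Dict.mk init : PySem.Dict String (List String))
        else (PySem.Dict.mk init).insert pd.1
          ((PySem.List.sorted idxs (fun i => i)).map (fun i => PySem.List.pyGetD an i "")))
        = PySem.Dict.mk (init ++ (if m = [] then [] else [(pd.1, m)])) := by
      rw [hval]
      by_cases hc : m = []
      · rw [if_pos (hemp.mpr hc), if_pos hc]
        simp
      · rw [if_neg (fun h => hc (hemp.mp h)), if_neg hc]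
        apply PySem.Dict.ext
        rw [PySem.Dict.items_insert_of_not_contains]
        rw [PySem.Dict.contains_eq_decide_mem_keys]
        simp [PySem.Dict.keys_mk, hdisj pd (by simp)]
    rw [hstep, ih (init ++ (if m = [] then [] else [(pd.1, m)])) hnd'.2
      (by
        intro p hp
        simp only [List.map_append, List.mem_append]
        rintro (hin | hopt)
        · exact hdisj p (by simp [hp]) hin
        · have hne : p.1 ≠ pd.1 := by
            intro he
            exact hnd'.1 (he ▸ List.mem_map.mpr ⟨p, hp, rfl⟩)
          split at hopt
          · simp at hopt
          · simp at hopt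
            exact hne hopt)]
    simp only [pvCanon, List.flatMap_cons, ← hmm, List.append_assoc]

-- ===== VERDICT (by name: the statement is the Claim_ definition above) =====
theorem map_agents_to_plugins_spec : Claim_equal_map_agents_to_plugins := by
  intro an cat _ hpre
  unfold Spec_map_agents_to_plugins
  have hA : map_agents_to_plugins an cat = pvCanon an cat := by
    unfold map_agents_to_plugins
    simp only [show (PySem.Dict.empty : PySem.Dict String (List String)) = PySem.Dict.mk [] from rfl]
    simpa using pv_A_outer an cat [] hpre (by simp)
  have hB : map_agents_to_plugins_alt an cat = pvCanon an cat := by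
    unfold map_agents_to_plugins_alt
    simp only [show (PySem.Dict.empty : PySem.Dict String (List String)) = PySem.Dict.mk [] from rfl]
    simpa using pv_B_outer an cat [] hpre (by simp)
  rw [hA, hB]
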